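-- pv_equiv track=rewrite | github.com/SebastianGonzalez2000/Client-Server-on-Sockets-Project | server.py | find_server_ip
-- ===== SOURCE A (Python) =====
-- def find_server_ip(ipaddrlist):
-- 	if len(ipaddrlist) == 1:
-- 		return ipaddrlist[0]
--
-- 	else:
-- 		if ipaddrlist[0] == '127.0.0.1':
-- 			return find_server_ip(ipaddrlist[1:])
--
-- 		else:
-- 			return ipaddrlist[0]
-- ===== SOURCE B (Python) =====
-- def find_server_ip(ipaddrlist):
-- 	n = len(ipaddrlist)
-- 	for i, ip in enumerate(ipaddrlist):
-- 		if i == n - 1 or ip != '127.0.0.1':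
-- 			return ip
-- 	return ipaddrlist[0]
-- ===== Notes on version B (the rewrite author's own statement) =====
-- stated objective: simpler
-- what changed: Replaces A's recursion with repeated list slicing by a single iterative forward pass with enumerate, returning the current element when it is the last index or not the loopback address.
import Mathlib
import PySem

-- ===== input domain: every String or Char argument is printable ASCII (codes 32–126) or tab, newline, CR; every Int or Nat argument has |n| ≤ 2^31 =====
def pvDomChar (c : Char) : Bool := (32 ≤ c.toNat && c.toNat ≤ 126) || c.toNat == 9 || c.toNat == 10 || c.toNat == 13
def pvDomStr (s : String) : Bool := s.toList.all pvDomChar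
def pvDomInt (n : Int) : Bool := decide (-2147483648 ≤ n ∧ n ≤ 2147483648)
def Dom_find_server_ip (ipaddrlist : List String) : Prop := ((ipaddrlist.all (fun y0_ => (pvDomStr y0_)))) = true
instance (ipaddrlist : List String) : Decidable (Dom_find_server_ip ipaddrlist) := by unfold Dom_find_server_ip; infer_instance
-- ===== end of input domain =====

-- B replaces A's recursion-with-slicing by a single iterative forward pass (simpler decomposition); same values on all nonempty lists.

-- ===== PORT A =====
-- A recurses: a one-element list returns its element; otherwise a loopback head recurses on the tail slice, any other head is returned.
def find_server_ip (ipaddrlist : List String) : Option String :=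
  if ipaddrlist.length = 1 then
    PySem.List.pyGet? ipaddrlist 0
  else
    match h : PySem.List.pyGet? ipaddrlist 0 with
    | none => none    -- ipaddrlist[0] raises IndexError (empty list)
    | some x =>
      if x = "127.0.0.1" then
        find_server_ip (PySem.List.slice ipaddrlist (some 1) none)
      else
        some x
termination_by ipaddrlist.length
decreasing_by
  cases ipaddrlist with
  | nil => simp [PySem.List.pyGet?, PySem.List.pyIdx?] at h
  | cons a t => simp [PySem.List.slice_from]

-- ===== PORT B =====
-- the for-loop over enumerate(ipaddrlist) with running index i and total length n
def pvAltLoop (n : Int) (i : Int) (l : List String) : Option String :=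
  match l with
  | [] => none
  | ip :: rest =>
    if i = n - 1 ∨ ip ≠ "127.0.0.1" then some ip else pvAltLoop n (i + 1) rest

def find_server_ip_alt (ipaddrlist : List String) : Option String :=
  match pvAltLoop (ipaddrlist.length : Int) 0 ipaddrlist with
  | some r => some r
  | none => PySem.List.pyGet? ipaddrlist 0   -- fall-through: return ipaddrlist[0] (raises on empty)

-- ===== PRECONDITION & SPEC =====
-- Pre_ excludes exactly the empty list, on which both A and B raise IndexError.
def Pre_find_server_ip (ipaddrlist : List String) : Prop := ipaddrlist ≠ []
instance (ipaddrlist : List String) : Decidable (Pre_find_server_ip ipaddrlist) := by unfold Pre_find_server_ip; infer_instance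
def pvWitness_find_server_ip : List String := ["127.0.0.1", "10.0.0.2"]
def Spec_find_server_ip (ipaddrlist : List String) (out : Option String) : Prop := out = find_server_ip_alt ipaddrlist
instance (ipaddrlist : List String) (out : Option String) : Decidable (Spec_find_server_ip ipaddrlist out) := by unfold Spec_find_server_ip; infer_instance

-- ===== CLAIM (what is proved, stated in full; the proofs are below) =====
def Claim_equal_find_server_ip : Prop := ∀ (ipaddrlist : List String), Dom_find_server_ip ipaddrlist → Pre_find_server_ip ipaddrlist → Spec_find_server_ip ipaddrlist (find_server_ip ipaddrlist)

-- ===== LEMMAS AND PROOFS =====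

lemma find_server_ip_single (a : String) : find_server_ip [a] = some a := by
  rw [find_server_ip]; simp

lemma find_server_ip_cons2 (a b : String) (u : List String) :
    find_server_ip (a :: b :: u) =
      if a = "127.0.0.1" then find_server_ip (b :: u) else some a := by
  rw [find_server_ip, if_neg (by simp)]
  have hc : (0:Int) ≤ ↑u.length + 1 := by omega
  split
  · next h => simp [PySem.List.pyGet?, PySem.List.pyIdx?, hc] at h
  · next x h =>
      have hx : x = a := by
        simp [PySem.List.pyGet?, PySem.List.pyIdx?, hc] at h
        exact h.symm
      subst hx
      simp [PySem.List.slice_from]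

lemma pvAltLoop_eq (l : List String) : ∀ (n i : Int), l ≠ [] → n - i = l.length →
    pvAltLoop n i l = find_server_ip l := by
  induction l with
  | nil => intro n i h _; exact absurd rfl h
  | cons a t ih =>
    intro n i _ hni
    cases t with
    | nil =>
      have hi : i = n - 1 := by simp at hni; omega
      simp [pvAltLoop, hi, find_server_ip_single]
    | cons b u =>
      have hi : i ≠ n - 1 := by simp at hni; omega
      rw [find_server_ip_cons2]
      by_cases ha : a = "127.0.0.1"
      · rw [pvAltLoop, if_neg (by simp [hi, ha]),
          ih n (i + 1) (by simp) (by simp at hni ⊢; omega), if_pos ha]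
      · rw [pvAltLoop, if_pos (Or.inr ha), if_neg ha]

lemma find_server_ip_isSome (l : List String) (h : l ≠ []) : (find_server_ip l).isSome := by
  induction l with
  | nil => exact absurd rfl h
  | cons a t ih =>
    cases t with
    | nil => simp [find_server_ip_single]
    | cons b u =>
      rw [find_server_ip_cons2]
      by_cases ha : a = "127.0.0.1"
      · simpa [ha] using ih (by simp)
      · simp [ha]

-- ===== VERDICT (by name: the statement is the Claim_ definition above) =====
theorem find_server_ip_spec : Claim_equal_find_server_ip := by
  intro l _ hpre
  unfold Spec_find_server_ip find_server_ip_alt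
  rw [pvAltLoop_eq l (l.length : Int) 0 hpre (by simp)]
  rcases Option.isSome_iff_exists.mp (find_server_ip_isSome l hpre) with ⟨x, hx⟩
  simp [hx]
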